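-- pv_equiv track=rewrite | github.com/parttee/tira2020 | week2/onechar.py | count
-- ===== SOURCE A (Python) =====
-- def substrCount(s):
--     size = len(s)
--
--     cnt = 0
--
--     for i in range(size):
--         cnt += len(s[0: i + 1])
--
--     return cnt
--
-- def count(s):
--     size = min(len(s), 100000)
--
--     cnt = 0
--
--     subset = ""
--     prev = s[0]
--
--     for i in range(size):
--         if(prev == s[i]):
--             subset += s[i]
--         else:
--             cnt += substrCount(subset)
--             subset = s[i]
--         if(i == size - 1):
--             cnt += substrCount(subset)
--         prev = s[i]
--
--     return cnt
-- ===== SOURCE B (Python) =====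
-- def count(s):
--     # One pass over the first 100000 chars: sum run_length*(run_length+1)//2 per run.
--     t = s[:100000]
--     total = 0
--     run = 0
--     prev = None
--     for c in t:
--         if c == prev:
--             run += 1
--         else:
--             total += run * (run + 1) // 2
--             run = 1
--             prev = c
--     return total + run * (run + 1) // 2
-- ===== Notes on version B (the rewrite author's own statement) =====
-- stated objective: faster
-- what changed: Replaces the rebuilt-substring loop whose substrCount helper sums the lengths of all prefixes of each run with a single pass that counts each run's length and adds run*(run+1)//2 in closed form.
import Mathlib
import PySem

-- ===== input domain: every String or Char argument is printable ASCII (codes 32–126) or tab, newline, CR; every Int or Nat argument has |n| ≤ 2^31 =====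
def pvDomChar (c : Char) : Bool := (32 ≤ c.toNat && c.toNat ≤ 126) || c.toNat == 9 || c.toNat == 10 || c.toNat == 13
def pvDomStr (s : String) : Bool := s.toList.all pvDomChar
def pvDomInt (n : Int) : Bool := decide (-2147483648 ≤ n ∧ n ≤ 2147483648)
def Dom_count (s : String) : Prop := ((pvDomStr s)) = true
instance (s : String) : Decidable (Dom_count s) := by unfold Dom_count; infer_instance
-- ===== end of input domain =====

-- B replaces A's per-run quadratic substrCount (summing the lengths of all prefixes of each rebuilt run string)
-- by a single pass that counts each run's length and adds run*(run+1)//2 in closed form.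
-- Pre_ excludes only the empty string, on which A raises IndexError (s[0]); B (naturally) returns 0 there.

-- ===== PORT A =====
-- helper substrCount(s): for i in range(len(s)): cnt += len(s[0:i+1])
def substrCount (s : List Char) : Int :=
  let size : Int := (s.length : Int)
  (PySem.List.pyRange 0 size 1).foldl
    (fun cnt i => cnt + ((PySem.List.slice s (some 0) (some (i + 1))).length : Int)) 0

-- body of A's for-loop (state: cnt, subset, prev; i the loop index)
def bodyA (cs : List Char) (size : Int) (st : Int × List Char × Char) (i : Int) :
    Int × List Char × Char :=
  let c := PySem.List.pyGetD cs i ' '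
  let cnt := st.1
  let subset := st.2.1
  let prev := st.2.2
  let p : Int × List Char :=
    if prev == c then (cnt, subset ++ [c]) else (cnt + substrCount subset, [c])
  let cnt' := if i == size - 1 then p.1 + substrCount p.2 else p.1
  (cnt', p.2, c)

def count (s : String) : Int :=
  let cs := s.toList
  let size : Int := min (cs.length : Int) 100000
  let prev0 := PySem.List.pyGetD cs 0 ' '   -- s[0]; Pre_count guarantees s ≠ ""
  ((PySem.List.pyRange 0 size 1).foldl (bodyA cs size) (0, [], prev0)).1

-- ===== PORT B =====
-- body of B's single pass (state: total, run, prev)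
def bodyB (st : Int × Int × Option Char) (c : Char) : Int × Int × Option Char :=
  if some c == st.2.2 then (st.1, st.2.1 + 1, st.2.2)
  else (st.1 + PySem.Int.floordiv (st.2.1 * (st.2.1 + 1)) 2, 1, some c)

def count_alt (s : String) : Int :=
  let t := s.toList.take 100000
  let st := t.foldl bodyB (0, 0, none)
  st.1 + PySem.Int.floordiv (st.2.1 * (st.2.1 + 1)) 2

-- ===== PRECONDITION & SPEC =====
def Pre_count (s : String) : Prop := s ≠ ""
instance (s : String) : Decidable (Pre_count s) := by unfold Pre_count; infer_instance
def pvWitness_count : String := "aab"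

def Spec_count (s : String) (out : Int) : Prop := out = count_alt s
instance (s : String) (out : Int) : Decidable (Spec_count s out) := by unfold Spec_count; infer_instance

-- ===== CLAIM (what is proved, stated in full; the proofs are below) =====
def Claim_equal_count : Prop := ∀ (s : String), Dom_count s → Pre_count s → Spec_count s (count s)

-- ===== LEMMAS AND PROOFS =====

-- B's closed formula, as an abbreviation for the proofs
def tri (r : Int) : Int := PySem.Int.floordiv (r * (r + 1)) 2

theorem sumPrefix (l : List Char) : ∀ (n : Nat), n ≤ l.length → ∀ (acc : Int),
    (PySem.List.pyRange 0 (n:Int) 1).foldl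
      (fun cnt i => cnt + ((PySem.List.slice l (some 0) (some (i + 1))).length : Int)) acc
    = acc + ((n*(n+1)/2 : Nat) : Int) := by
  intro n
  induction n with
  | zero => intro _ acc; simp
  | succ n ih =>
    intro h acc
    have e : (((n+1:Nat)):Int) = (n:Int)+1 := by push_cast; ring
    rw [e, PySem.List.pyRange_one_succ_right (by positivity), List.foldl_append,
        ih (by omega) acc]
    have e2 : ((n:Int)+1) = (((n+1:Nat)):Int) := by push_cast; ring
    simp only [List.foldl_cons, List.foldl_nil]
    rw [PySem.List.slice_zero_start, e2, PySem.List.slice_to_natCast]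
    have hlen : (l.take (n+1)).length = n+1 := by simp; omega
    rw [hlen]
    have key : (n+1)*(n+1+1)/2 = n*(n+1)/2 + (n+1) := by
      have h1 : (n+1)*(n+1+1) = n*(n+1) + (n+1)*2 := by ring
      rw [h1]; omega
    rw [key]
    push_cast
    ring

theorem substrCount_eq (l : List Char) : substrCount l = tri (l.length : Int) := by
  unfold substrCount tri
  rw [sumPrefix l l.length le_rfl 0]
  have e : (l.length : Int) * ((l.length : Int) + 1) = ((l.length * (l.length + 1) : Nat) : Int) := by
    push_cast; ring
  rw [e]
  have hfd := PySem.Int.floordiv_natCast (l.length * (l.length + 1)) 2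
  simp only [Nat.cast_ofNat] at hfd
  omega

-- A's plain loop step (the last-iteration add stripped off)
def stepA (st : Int × List Char × Char) (c : Char) : Int × List Char × Char :=
  if st.2.2 == c then (st.1, st.2.1 ++ [c], c) else (st.1 + substrCount st.2.1, [c], c)

-- invariant: A's plain step and B's step keep (cnt, |subset|, prev) in lock-step
theorem inv_fold (l : List Char) :
    ∀ (cnt : Int) (sub : List Char) (p : Char),
      (l.foldl stepA (cnt, sub, p)).1 = (l.foldl bodyB (cnt, (sub.length : Int), some p)).1 ∧
      ((l.foldl stepA (cnt, sub, p)).2.1.length : Int) = (l.foldl bodyB (cnt, (sub.length : Int), some p)).2.1 ∧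
      (l.foldl bodyB (cnt, (sub.length : Int), some p)).2.2 = some (l.foldl stepA (cnt, sub, p)).2.2 := by
  induction l with
  | nil => intro cnt sub p; exact ⟨rfl, rfl, rfl⟩
  | cons c l ih =>
    intro cnt sub p
    simp only [List.foldl_cons]
    by_cases hc : p = c
    · subst hc
      have hA : stepA (cnt, sub, p) p = (cnt, sub ++ [p], p) := by simp [stepA]
      have hB : bodyB (cnt, (sub.length : Int), some p) p = (cnt, (sub.length : Int) + 1, some p) := by
        simp [bodyB]
      rw [hA, hB]
      simpa using ih cnt (sub ++ [p]) p
    · have hA : stepA (cnt, sub, p) c = (cnt + substrCount sub, [c], c) := by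
        simp [stepA, hc]
      have hB : bodyB (cnt, (sub.length : Int), some p) c
          = (cnt + tri (sub.length : Int), 1, some c) := by
        simp [bodyB, tri, Ne.symm hc]
      rw [hA, hB, substrCount_eq]
      simpa using ih (cnt + tri (sub.length : Int)) [c] c

-- on indices below size-1 A's loop body is its plain step on the corresponding character
theorem prefix_fold (cs : List Char) (size : Int) :
    ∀ (m : Nat), (m:Int) ≤ size - 1 → m ≤ cs.length →
    ∀ (st : Int × List Char × Char),
      (PySem.List.pyRange 0 (m:Int) 1).foldl (bodyA cs size) st = (cs.take m).foldl stepA st := by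
  intro m
  induction m with
  | zero => intro _ _ st; simp
  | succ m ih =>
    intro h1 h2 st
    have e : (((m+1:Nat)):Int) = (m:Int)+1 := by push_cast; ring
    have hm : m < cs.length := by omega
    rw [e, PySem.List.pyRange_one_succ_right (by positivity), List.foldl_append,
        ih (by push_cast at h1 ⊢; omega) (by omega) st,
        List.take_succ_eq_append_getElem hm, List.foldl_append]
    simp only [List.foldl_cons, List.foldl_nil]
    have hget : PySem.List.pyGetD cs (m:Int) ' ' = cs[m] := by
      rw [PySem.List.pyGetD_natCast, List.getD_eq_getElem?_getD, List.getElem?_eq_getElem hm]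
      rfl
    have hne : ((m:Int) == size - 1) = false := by
      rw [beq_eq_false_iff_ne]
      push_cast at h1
      omega
    simp only [bodyA, stepA, hget, hne, Bool.false_eq_true, if_false]
    split <;> rfl

-- the last loop step plus the final-iteration add equals B's last step plus B's closing term
theorem last_step (cs : List Char) (n : Nat) (hn1 : 1 ≤ n) (hidx : n - 1 < cs.length)
    (stA : Int × List Char × Char) (stB : Int × Int × Option Char)
    (h1 : stA.1 = stB.1) (h2 : (stA.2.1.length : Int) = stB.2.1) (h3 : stB.2.2 = some stA.2.2) :
    (bodyA cs (n:Int) stA ((n-1:Nat):Int)).1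
      = (bodyB stB cs[n-1]).1
        + PySem.Int.floordiv ((bodyB stB cs[n-1]).2.1 * ((bodyB stB cs[n-1]).2.1 + 1)) 2 := by
  obtain ⟨cnt, sub, p⟩ := stA
  obtain ⟨tot, run, pb⟩ := stB
  simp only at h1 h2 h3
  subst h1; subst h3
  have hget : PySem.List.pyGetD cs ((n-1:Nat):Int) ' ' = cs[n-1] := by
    rw [PySem.List.pyGetD_natCast, List.getD_eq_getElem?_getD, List.getElem?_eq_getElem hidx]
    rfl
  have heq : (((n-1:Nat):Int) == (n:Int) - 1) = true := by
    rw [beq_iff_eq]; omega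
  by_cases hpc : p = cs[n-1]
  · simp only [bodyA, bodyB, hget, heq, hpc, beq_self_eq_true, if_true]
    rw [substrCount_eq]
    simp only [List.length_append, List.length_cons, List.length_nil]
    rw [← h2]
    unfold tri
    push_cast
    ring_nf
  · have hA : (p == cs[n-1]) = false := by rw [beq_eq_false_iff_ne]; exact hpc
    have hB : (some cs[n-1] == some p) = false := by
      rw [beq_eq_false_iff_ne]; simp [Ne.symm hpc]
    simp only [bodyA, bodyB, hget, heq, hA, hB, if_false, if_true, Bool.false_eq_true]
    rw [substrCount_eq, substrCount_eq]
    simp only [List.length_cons, List.length_nil]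
    rw [← h2]
    unfold tri
    norm_num

-- ===== VERDICT (by name: the statement is the Claim_ definition above) =====
theorem count_spec : Claim_equal_count := by
  intro s _ hpre
  have hcs : s.toList ≠ [] := fun h => hpre (String.toList_eq_nil_iff.mp h)
  unfold Spec_count count count_alt
  obtain ⟨c0, rest, hL⟩ : ∃ c0 rest, s.toList = c0 :: rest := by
    cases h : s.toList with
    | nil => exact absurd h hcs
    | cons a l => exact ⟨a, l, rfl⟩
  rw [hL]
  set cs : List Char := c0 :: rest with hcsdef
  set n : Nat := min cs.length 100000 with hn
  have hlen : cs.length = rest.length + 1 := by rw [hcsdef]; rfl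
  have hn1 : 1 ≤ n := by omega
  have hnlen : n ≤ cs.length := by omega
  have hidx : n - 1 < cs.length := by omega
  have hsize : min ((cs.length:Int)) 100000 = (n:Int) := by
    rw [hn]; push_cast; rfl
  have htake : cs.take 100000 = cs.take n := by
    rcases le_or_gt cs.length 100000 with h | h
    · have h' : n = cs.length := by omega
      rw [List.take_of_length_le h, h', List.take_length]
    · have h' : n = 100000 := by omega
      rw [h']
  have hsplit : cs.take n = cs.take (n-1) ++ [cs[n-1]] := by
    conv_lhs => rw [show n = (n-1)+1 by omega]
    exact List.take_succ_eq_append_getElem hidx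
  have hrange : PySem.List.pyRange 0 (n:Int) 1
      = PySem.List.pyRange 0 ((n-1:Nat):Int) 1 ++ [((n-1:Nat):Int)] := by
    have e : (n:Int) = ((n-1:Nat):Int)+1 := by omega
    rw [e, PySem.List.pyRange_one_succ_right (Int.natCast_nonneg _)]
  dsimp only
  rw [hsize, hrange, List.foldl_append,
      prefix_fold cs (n:Int) (n-1) (by omega) (by omega),
      htake, hsplit, List.foldl_append]
  have hp0 : PySem.List.pyGetD cs 0 ' ' = c0 := by
    rw [hcsdef]; exact PySem.List.pyGetD_zero_cons ..
  simp only [List.foldl_cons, List.foldl_nil, hp0]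
  rcases eq_or_lt_of_le hn1 with h1 | h2
  · -- n = 1 : the first character is also the last
    have hnn : n = 1 := h1.symm
    have e0 : cs.take (n-1) = [] := by rw [show n - 1 = 0 by omega, List.take_zero]
    have hc0 : cs[n-1] = c0 := by
      have h0 : n - 1 = 0 := by omega
      simp [hcsdef, h0]
    have hi : ((n-1:Nat):Int) = 0 := by rw [show n - 1 = 0 by omega]; rfl
    rw [e0]
    simp only [List.foldl_nil]
    rw [hc0, hi]
    simp only [bodyA, bodyB, hp0, beq_self_eq_true, if_true]
    rw [substrCount_eq]
    simp [tri, hnn]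

  · -- n ≥ 2 : peel the first character off the prefix, then run the invariant
    have hpref : cs.take (n-1) = c0 :: rest.take (n-2) := by
      rw [hcsdef, show n-1 = (n-2)+1 by omega, List.take_succ_cons]
    rw [hpref]
    simp only [List.foldl_cons]
    have hA0 : stepA (0, [], c0) c0 = (0, [c0], c0) := by simp [stepA]
    have hB0 : bodyB (0, 0, none) c0 = (0, 1, some c0) := by
      simp [bodyB]
    rw [hA0, hB0]
    obtain ⟨i1, i2, i3⟩ := inv_fold (rest.take (n-2)) 0 [c0] c0
    simp only [List.length_cons, List.length_nil] at i1 i2 i3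
    exact last_step cs n hn1 hidx _ _ i1 i2 i3
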